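-- pv_equiv track=rewrite | github.com/ssebastianmag/google-foobar | level-1/the-cake-is-not-a-lie/solution.py | solution
-- ===== SOURCE A (Python) =====
-- def solution(s):
--     n = len(s)
--     for i in range(1, n + 1):
--         if n % i == 0:
--             valid = True
--             # Check if each segment of length i contains the same characters
--             for j in range(i):
--                 for k in range(j, n, i):
--                     if s[k] != s[j]:
--                         valid = False
--                         break
--                 if not valid:
--                     break
--             if valid:
--                 # Return the number of equal parts if a valid divisor is found
--                 return n // i
--     # If no valid divisor is found, return 1 indicating the entire cake cannot be divided into equal parts
--     return 1
-- ===== SOURCE B (Python) =====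
-- def solution(s):
--     # Smallest period p that divides n, found by comparing s against its own
--     # p-shift (s[p:] == s[:n-p] iff p is a period of s); answer is n // p.
--     n = len(s)
--     for p in range(1, n + 1):
--         if n % p == 0 and s[p:] == s[:n - p]:
--             return n // p
--     return 1
-- ===== Notes on version B (the rewrite author's own statement) =====
-- stated objective: alternative
-- what changed: Instead of scanning every residue class j mod i character by character with break flags, B tests each candidate period p with a single self-shift comparison s[p:] == s[:n-p] (the border/period characterization of divisibility periods), one slice equality per candidate.
import Mathlib
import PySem

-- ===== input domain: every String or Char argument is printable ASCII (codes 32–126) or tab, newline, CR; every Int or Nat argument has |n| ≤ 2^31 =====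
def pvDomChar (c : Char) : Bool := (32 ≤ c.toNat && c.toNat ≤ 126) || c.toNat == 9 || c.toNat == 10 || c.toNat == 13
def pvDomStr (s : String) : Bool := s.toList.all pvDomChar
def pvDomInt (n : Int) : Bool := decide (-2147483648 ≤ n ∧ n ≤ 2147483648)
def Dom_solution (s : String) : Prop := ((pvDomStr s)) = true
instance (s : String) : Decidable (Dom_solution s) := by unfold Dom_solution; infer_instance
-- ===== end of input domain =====

-- A scans every residue class of each divisor with break flags; B tests each candidate
-- period p with one self-shift comparison s[p:] == s[:n-p] (alternative decomposition).


-- ===== PORT A =====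
-- for i in range(1, n+1): the first i with n % i == 0 and all residue classes
-- j, j+i, j+2i, … constant returns n // i (the break/valid-flag nest is the
-- short-circuit `all`); otherwise return 1.
def solution (s : String) : Int :=
  let cs := s.toList
  let n := cs.length
  match (List.range' 1 n).find? (fun i =>
      n % i == 0 &&
      (List.range i).all (fun j =>
        (PySem.List.pyRange (j : Int) (n : Int) (i : Int)).all (fun k =>
          PySem.List.pyGet? cs k == PySem.List.pyGet? cs (j : Int)))) with
  | some i => ((n / i : Nat) : Int)
  | none => 1

-- ===== PORT B =====
-- s[p:] and s[:n-p] with 0 ≤ p ≤ n are exactly List.drop p / List.take (n-p).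
def solution_alt (s : String) : Int :=
  let cs := s.toList
  let n := cs.length
  match (List.range' 1 n).find? (fun p =>
      n % p == 0 && cs.drop p == cs.take (n - p)) with
  | some p => ((n / p : Nat) : Int)
  | none => 1

-- ===== PRECONDITION & SPEC =====
def Spec_solution (s : String) (out : Int) : Prop := out = solution_alt s
instance (s : String) (out : Int) : Decidable (Spec_solution s out) := by unfold Spec_solution; infer_instance

-- ===== CLAIM (what is proved, stated in full; the proofs are below) =====
def Claim_equal_solution : Prop := ∀ (s : String), Dom_solution s → Spec_solution s (solution s)

-- ===== LEMMAS AND PROOFS =====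

theorem find?_congr_mem {α} {p q : α → Bool} {l : List α}
    (h : ∀ x ∈ l, p x = q x) : l.find? p = l.find? q := by
  induction l with
  | nil => rfl
  | cons a t ih =>
    simp only [List.find?_cons, h a (by simp)]
    cases q a
    · exact ih (fun x hx => h x (by simp [hx]))
    · rfl

-- Propositional reading of A's residue-class check for a fixed divisor i.
theorem predA_iff (cs : List Char) (i : Nat) (hi : 0 < i) :
    ((List.range i).all (fun j =>
        (PySem.List.pyRange (j : Int) (cs.length : Int) (i : Int)).all (fun k =>
          PySem.List.pyGet? cs k == PySem.List.pyGet? cs (j : Int))) = true)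
    ↔ ∀ j t : Nat, j < i → j + t * i < cs.length → cs[j + t * i]? = cs[j]? := by
  rw [List.all_eq_true]
  constructor
  · intro h j t hj hlt
    have hmem : ((j + t * i : Nat) : Int) ∈
        PySem.List.pyRange (j : Int) (cs.length : Int) (i : Int) := by
      rw [PySem.List.mem_pyRange_iff_of_pos (by exact_mod_cast hi)]
      refine ⟨by push_cast; omega, by exact_mod_cast hlt, ⟨(t : Int), by push_cast; ring⟩⟩
    have h2 := List.all_eq_true.mp (h (j : Nat) (by simpa using hj)) _ hmem
    rw [beq_iff_eq] at h2
    rw [PySem.List.pyGet?_natCast, PySem.List.pyGet?_natCast] at h2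
    exact h2
  · intro h j hj
    rw [List.all_eq_true]
    intro k hk
    rw [PySem.List.mem_pyRange_iff_of_pos (by exact_mod_cast hi)] at hk
    obtain ⟨hk1, hk2, t, ht⟩ := hk
    have hj' : j < i := by simpa using hj
    have ht0 : 0 ≤ t := by nlinarith [hk1, ht]
    have hk0 : 0 ≤ k := by omega
    have htu : ((t.toNat : Nat) : Int) = t := Int.toNat_of_nonneg ht0
    have hkeq : k = ((j + t.toNat * i : Nat) : Int) := by
      push_cast [htu]; linarith [ht, mul_comm (i : Int) t]
    have hlt : j + t.toNat * i < cs.length := by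
      rw [hkeq] at hk2; exact_mod_cast hk2
    have := h j t.toNat hj' hlt
    rw [hkeq, PySem.List.pyGet?_natCast, PySem.List.pyGet?_natCast]
    simp [this]
  
-- Propositional reading of B's self-shift check for a period candidate p ≤ n.
theorem predB_iff (cs : List Char) (p : Nat) (hp : p ≤ cs.length) :
    ((cs.drop p == cs.take (cs.length - p)) = true)
    ↔ ∀ m : Nat, m + p < cs.length → cs[m + p]? = cs[m]? := by
  rw [beq_iff_eq]
  constructor
  · intro h m hm
    have h2 : (cs.drop p)[m]? = (cs.take (cs.length - p))[m]? := by rw [h]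
    rw [List.getElem?_drop, List.getElem?_take_of_lt (by omega)] at h2
    rw [Nat.add_comm]
    exact h2
  · intro h
    apply List.ext_getElem?
    intro m
    by_cases hm : m < cs.length - p
    · rw [List.getElem?_drop, List.getElem?_take_of_lt hm, Nat.add_comm]
      exact h m (by omega)
    · rw [List.getElem?_drop]
      have h1 : cs[p + m]? = none := by
        rw [List.getElem?_eq_none_iff]; simpa using by omega
      have h2 : (cs.take (cs.length - p))[m]? = none := by
        rw [List.getElem?_eq_none_iff]; simp; omega
      rw [h1, h2]

-- Core: the residue-class property and the shift property agree (for 0 < p ≤ n).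
theorem resid_iff_shift (cs : List Char) (p : Nat) (hp0 : 0 < p) :
    (∀ j t : Nat, j < p → j + t * p < cs.length → cs[j + t * p]? = cs[j]?)
    ↔ ∀ m : Nat, m + p < cs.length → cs[m + p]? = cs[m]? := by
  constructor
  · intro h m hm
    have hj : m % p < p := Nat.mod_lt _ hp0
    have e1 : m % p + m / p * p = m := Nat.mod_add_div' m p
    have e2 : m + p = m % p + (m / p + 1) * p := by
      rw [Nat.add_mul, one_mul, ← Nat.add_assoc, e1]
    calc cs[m + p]? = cs[m % p + (m / p + 1) * p]? := by rw [← e2]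
      _ = cs[m % p]? := h _ _ hj (by rw [← e2]; omega)
      _ = cs[m % p + (m / p) * p]? := (h _ _ hj (by rw [e1]; omega)).symm
      _ = cs[m]? := by rw [e1]
  · intro h j t hj
    induction t with
    | zero => simp
    | succ t ih =>
      intro hlt
      have hlt' : j + t * p < cs.length := by
        have : j + (t+1) * p = j + t * p + p := by ring
        omega
      have e : j + (t+1) * p = (j + t * p) + p := by ring
      rw [e, h _ (by omega)]
      exact ih hlt'

-- The two find? predicates agree on every i in range(1, n+1).
theorem preds_agree (cs : List Char) (i : Nat) (hi : i ∈ List.range' 1 cs.length) :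
    ((cs.length % i == 0) &&
      (List.range i).all (fun j =>
        (PySem.List.pyRange (j : Int) (cs.length : Int) (i : Int)).all (fun k =>
          PySem.List.pyGet? cs k == PySem.List.pyGet? cs (j : Int))))
    = ((cs.length % i == 0) && (cs.drop i == cs.take (cs.length - i))) := by
  have hib : 1 ≤ i ∧ i ≤ cs.length := by
    rw [List.mem_range'] at hi; omega
  rcases Decidable.em (cs.length % i = 0) with hmod | hmod
  · have h0 : (cs.length % i == 0) = true := by simpa using hmod
    rw [h0, Bool.true_and, Bool.true_and]
    have hiff := (predA_iff cs i hib.1).trans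
      ((resid_iff_shift cs i hib.1).trans (predB_iff cs i hib.2).symm)
    exact Bool.eq_iff_iff.mpr hiff
  · have h0 : (cs.length % i == 0) = false := by simpa using hmod
    rw [h0, Bool.false_and, Bool.false_and]

-- ===== VERDICT (by name: the statement is the Claim_ definition above) =====
theorem solution_spec : Claim_equal_solution := by
  intro s _
  show solution s = solution_alt s
  simp only [solution, solution_alt]
  rw [find?_congr_mem (fun i hi => preds_agree s.toList i hi)]
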